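-- pv_equiv track=rewrite | github.com/amol-ship-it/agi-core | domains/arc/transformation_primitives.py | extract_unique_color_region
-- ===== SOURCE A (Python) =====
-- Grid = list[list[int]]
--
-- def extract_unique_color_region(grid: Grid) -> Grid:
--     """Extract bounding box of the region with the rarest non-zero color.
--
--     Finds the least-common non-zero color and returns the bounding box
--     containing all pixels of that color.
--
--     Justified by tasks c909285e, 0b148d64, 23b5c85d.
--     """
--     if not grid or not grid[0]:
--         return grid
--     from collections import Counter
--     h, w = len(grid), len(grid[0])
--     colors = Counter(c for row in grid for c in row if c != 0)
--     if not colors: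
--         return grid
--     rarest = colors.most_common()[-1][0]
--     rows = [r for r in range(h) for c in range(w) if grid[r][c] == rarest]
--     cols = [c for r in range(h) for c in range(w) if grid[r][c] == rarest]
--     if not rows:
--         return grid
--     return [grid[r][min(cols):max(cols) + 1] for r in range(min(rows), max(rows) + 1)]
-- ===== SOURCE B (Python) =====
-- def extract_unique_color_region(grid):
--     if not grid or not grid[0]:
--         return grid
--     pos = {}
--     for r, row in enumerate(grid):
--         for c, v in enumerate(row):
--             if v != 0:
--                 pos.setdefault(v, []).append((r, c))
--     if not pos:
--         return grid
--     rarest, best = None, None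
--     for color, pts in pos.items():
--         if best is None or len(pts) <= best:
--             rarest, best = color, len(pts)
--     pts = pos[rarest]
--     rmin = min(p[0] for p in pts)
--     rmax = max(p[0] for p in pts)
--     cmin = min(p[1] for p in pts)
--     cmax = max(p[1] for p in pts)
--     return [grid[r][cmin:cmax + 1] for r in range(rmin, rmax + 1)]
-- ===== Notes on version B (the rewrite author's own statement) =====
-- stated objective: alternative
-- what changed: One pass builds a dict mapping each non-zero color to its coordinate list; the rarest color is found by a <=-scan of that dict (replacing Counter + most_common() stable sort) and the bounding box is computed from the stored coordinates, so A's two further full-grid index scans disappear.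
-- outside the precondition, e.g. on extract_unique_color_region([[1], [1, 2]]): A returns [[1], [1, 2]], B returns [[2]]; on extract_unique_color_region([[1, 2], [1]]): A raises IndexError, B returns [[2]]
import Mathlib
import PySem

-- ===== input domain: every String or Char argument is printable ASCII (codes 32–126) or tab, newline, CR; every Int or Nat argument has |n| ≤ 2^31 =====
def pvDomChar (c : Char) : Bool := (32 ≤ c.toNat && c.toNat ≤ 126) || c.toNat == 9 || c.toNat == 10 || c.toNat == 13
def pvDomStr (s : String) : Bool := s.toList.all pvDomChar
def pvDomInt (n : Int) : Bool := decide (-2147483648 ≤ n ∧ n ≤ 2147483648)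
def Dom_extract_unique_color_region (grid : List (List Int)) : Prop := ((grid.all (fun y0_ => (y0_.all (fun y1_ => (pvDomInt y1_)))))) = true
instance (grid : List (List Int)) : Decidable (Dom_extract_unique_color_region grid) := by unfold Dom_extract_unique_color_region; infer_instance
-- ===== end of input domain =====

-- B replaces A's Counter + most_common() sort + two further full-grid index scans by one pass
-- that records every non-zero cell's coordinates per color, a ≤-scan for the rarest color, and
-- a bounding box computed from the recorded coordinates (objective: alternative).

-- ===== PORT A =====
def extract_unique_color_region (grid : List (List Int)) : List (List Int) :=
  if grid = [] ∨ grid.headD [] = [] then grid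
  else
    let h : Int := (grid.length : Int)
    let w : Int := ((grid.headD []).length : Int)
    let colors : PySem.Dict Int Int :=
      PySem.Dict.counter (grid.flatMap (fun row => row.filter (fun c => c != 0)))
    if colors.items = [] then grid
    else
      -- most_common() = stable sort of the items by count, descending; [-1] is the last entry
      let rarest : Int :=
        ((PySem.List.pyGet? (PySem.List.sorted colors.items (fun kv => kv.2) true) (-1)).getD (0, 0)).1
      let rows : List Int := (PySem.List.pyRange 0 h).flatMap (fun r =>
        ((PySem.List.pyRange 0 w).filter (fun c =>
          ((PySem.List.pyGet? grid r).bind (fun row => PySem.List.pyGet? row c)) == some rarest)).map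
          (fun _ => r))
      let cols : List Int := (PySem.List.pyRange 0 h).flatMap (fun r =>
        (PySem.List.pyRange 0 w).filter (fun c =>
          ((PySem.List.pyGet? grid r).bind (fun row => PySem.List.pyGet? row c)) == some rarest))
      if rows = [] then grid
      else
        let cmin : Int := (PySem.List.min? cols (fun x => x)).getD 0
        let cmax : Int := (PySem.List.max? cols (fun x => x)).getD 0
        let rmin : Int := (PySem.List.min? rows (fun x => x)).getD 0
        let rmax : Int := (PySem.List.max? rows (fun x => x)).getD 0
        (PySem.List.pyRange rmin (rmax + 1)).map (fun r =>
          PySem.List.slice ((PySem.List.pyGet? grid r).getD []) (some cmin) (some (cmax + 1)))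

-- ===== PORT B =====
def extract_unique_color_region_alt (grid : List (List Int)) : List (List Int) :=
  if grid = [] ∨ grid.headD [] = [] then grid
  else
    -- one pass: for every non-zero color the list of its coordinates, in scan order
    let pos : PySem.Dict Int (List (Int × Int)) :=
      (PySem.List.enumerate grid).foldl (fun d rp =>
        (PySem.List.enumerate rp.2).foldl (fun d cv =>
          if cv.2 != 0 then d.modify cv.2 [] (fun l => l ++ [(rp.1, cv.1)]) else d) d)
        PySem.Dict.empty
    if pos.items = [] then grid
    else
      -- rarest color: minimal position count, ties to the later-inserted color (≤ update)
      let sel : Option (Int × Nat) := pos.items.foldl (fun acc p =>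
        match acc with
        | none => some (p.1, p.2.length)
        | some b => if p.2.length ≤ b.2 then some (p.1, p.2.length) else some b) none
      match sel with
      | none => grid
      | some b =>
        let pts : List (Int × Int) := pos.getD b.1 []
        let rmin : Int := (PySem.List.min? (pts.map (fun p => p.1)) (fun x => x)).getD 0
        let rmax : Int := (PySem.List.max? (pts.map (fun p => p.1)) (fun x => x)).getD 0
        let cmin : Int := (PySem.List.min? (pts.map (fun p => p.2)) (fun x => x)).getD 0
        let cmax : Int := (PySem.List.max? (pts.map (fun p => p.2)) (fun x => x)).getD 0
        (PySem.List.pyRange rmin (rmax + 1)).map (fun r =>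
          PySem.List.slice ((PySem.List.pyGet? grid r).getD []) (some cmin) (some (cmax + 1)))

-- ===== PRECONDITION & SPEC =====
-- Pre_ excludes ragged grids containing a non-zero value: there A either raises IndexError (a row
-- shorter than the first) or, when every row is at least as long as the first, returns a value that
-- mixes counting colors over full rows with a bounding box clipped to the first row's width — on such
-- malformed (non-rectangular) input A's and B's readings are both defensible and neither is specified.
def Pre_extract_unique_color_region (grid : List (List Int)) : Prop :=
  grid.headD [] = [] ∨ (∀ row ∈ grid, row.length = (grid.headD []).length) ∨
    (∀ row ∈ grid, ∀ v ∈ row, v = 0)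
instance (grid : List (List Int)) : Decidable (Pre_extract_unique_color_region grid) := by
  unfold Pre_extract_unique_color_region; infer_instance

def pvWitness_extract_unique_color_region : List (List Int) := [[0, 3, 0], [2, 3, 2]]


def Spec_extract_unique_color_region (grid : List (List Int)) (out : List (List Int)) : Prop := out = extract_unique_color_region_alt grid
instance (grid : List (List Int)) (out : List (List Int)) : Decidable (Spec_extract_unique_color_region grid out) := by unfold Spec_extract_unique_color_region; infer_instance

-- ===== CLAIM (what is proved, stated in full; the proofs are below) =====
def Claim_equal_extract_unique_color_region : Prop := ∀ (grid : List (List Int)), Dom_extract_unique_color_region grid → Pre_extract_unique_color_region grid → Spec_extract_unique_color_region grid (extract_unique_color_region grid)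

-- ===== LEMMAS AND PROOFS =====

-- the grid's cells as (value, (row, col)) triples, in scan order
def pvCells (grid : List (List Int)) : List (Int × (Int × Int)) :=
  (PySem.List.enumerate grid).flatMap (fun rp =>
    (PySem.List.enumerate rp.2).map (fun cv => (cv.2, (rp.1, cv.1))))

-- the non-zero cells
def pvNz (grid : List (List Int)) : List (Int × (Int × Int)) :=
  (pvCells grid).filter (fun p => p.1 != 0)

-- A's selection step (on counter items) and B's selection step (on position items)
def pvGA : Option (Int × Int) → (Int × Int) → Option (Int × Int) :=
  fun acc x => match acc with
  | none => some x
  | some b => if x.2 ≤ b.2 then some x else some b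

def pvGB : Option (Int × Nat) → (Int × List (Int × Int)) → Option (Int × Nat) :=
  fun acc p => match acc with
  | none => some (p.1, p.2.length)
  | some b => if p.2.length ≤ b.2 then some (p.1, p.2.length) else some b

def pvLift : (Int × Nat) → (Int × Int) := fun b => (b.1, (b.2 : Int))



theorem pv_getLast?_cons_ne {α : Type} (c : α) (t : List α) (ht : t ≠ []) :
    (c :: t).getLast? = t.getLast? := by
  rcases List.exists_cons_of_ne_nil ht with ⟨b, u, rfl⟩
  exact List.getLast?_cons_cons

theorem pv_getLast?_insertBy {α : Type} (before : α → α → Bool) (x : α) (s : List α)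
    (h : ∃ y ∈ s, before x y = true) :
    (PySem.List.insertBy before x s).getLast? = s.getLast? := by
  induction s with
  | nil => simp at h
  | cons y ys ih =>
    rw [show PySem.List.insertBy before x (y :: ys) =
      if before x y then x :: y :: ys else y :: PySem.List.insertBy before x ys from rfl]
    by_cases hb : before x y = true
    · rw [if_pos hb]; exact List.getLast?_cons_cons
    · rw [if_neg hb]
      rcases h with ⟨z, hz, hbz⟩
      rcases List.mem_cons.mp hz with rfl | hz'
      · exact absurd hbz hb
      · have hys : ys ≠ [] := List.ne_nil_of_mem hz'
        have hins : PySem.List.insertBy before x ys ≠ [] := by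
          have := PySem.List.mem_insertBy before x x ys
          intro hnil; rw [hnil] at this; simp at this
        rw [pv_getLast?_cons_ne _ _ hins, pv_getLast?_cons_ne _ _ hys]
        exact ih ⟨z, hz', hbz⟩

theorem pv_getLast?_min_of_pairwise (l : List (Int × Int))
    (hp : l.Pairwise (fun a b => b.2 ≤ a.2)) (m : Int × Int) (hm : l.getLast? = some m) :
    ∀ y ∈ l, m.2 ≤ y.2 := by
  induction l with
  | nil => simp at hm
  | cons a t ih =>
    rcases List.pairwise_cons.mp hp with ⟨ha, hpt⟩
    cases t with
    | nil =>
      simp at hm; subst hm; simp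
    | cons b t' =>
      rw [List.getLast?_cons_cons] at hm
      have hmin := ih hpt hm
      intro y hy
      rcases List.mem_cons.mp hy with rfl | hy'
      · exact le_trans (hmin _ (List.mem_of_getLast? hm)) (ha _ (List.mem_of_getLast? hm))
      · exact hmin y hy'

theorem pv_pyGet?_neg_one {α : Type} (xs : List α) : PySem.List.pyGet? xs (-1) = xs.getLast? := by
  cases xs with
  | nil => rfl
  | cons a t =>
    simp [PySem.List.pyGet?, PySem.List.pyIdx?, List.getLast?_eq_getElem?]

theorem pv_getLast?_sorted_rev (l : List (Int × Int)) :
    (PySem.List.sorted l (fun kv => kv.2) true).getLast? = l.foldl pvGA none := by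
  induction l using List.reverseRecOn with
  | nil => rfl
  | append_singleton l' x ih =>
    rw [PySem.List.sorted_rev_eq_foldl_insertBy, List.foldl_append, List.foldl_append,
      ← PySem.List.sorted_rev_eq_foldl_insertBy]
    simp only [List.foldl_cons, List.foldl_nil]
    set S := PySem.List.sorted l' (fun kv => kv.2) true with hS
    by_cases hnil : S = []
    · have hl' : l' = [] := (PySem.List.sorted_eq_nil_iff _ _ _).mp hnil
      subst hl'
      simp only [List.foldl_nil] at ih ⊢
      rw [hnil]
      rfl
    · rcases Option.ne_none_iff_exists'.mp (by simpa using hnil : S.getLast? ≠ none) with ⟨m, hm⟩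
      have hmem : m ∈ S := List.mem_of_getLast? hm
      have hpw : S.Pairwise (fun a b => b.2 ≤ a.2) := by
        have := PySem.List.sorted_pairwise_rev (xs := l') (key := fun kv => kv.2)
        simpa [hS] using this
      have hmin := pv_getLast?_min_of_pairwise S hpw m hm
      have hmF : List.foldl pvGA none l' = some m := by rw [← ih]; exact hm
      rw [hmF]
      by_cases hle : x.2 ≤ m.2
      · have hall : ∀ y ∈ S, (fun a b => decide (b.2 < a.2)) x y = false := by
          intro y hy
          simp only [decide_eq_false_iff_not, not_lt]
          exact le_trans hle (hmin y hy)
        rw [PySem.List.insertBy_of_forall_not_before _ _ _ hall]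
        simp [pvGA, hle]
      · have : (fun a b => decide (b.2 < a.2)) x m = true := by
          simp only [decide_eq_true_eq]; omega
        rw [pv_getLast?_insertBy _ _ _ ⟨m, hmem, this⟩, hm]
        simp [pvGA, hle]

theorem pv_fold_bridge (K : List Int) (f : Int → Int) (g : Int → List (Int × Int))
    (h : ∀ k ∈ K, f k = ((g k).length : Int)) (accB : Option (Int × Nat)) :
    (K.map (fun k => (k, f k))).foldl pvGA (accB.map pvLift) =
      ((K.map (fun k => (k, g k))).foldl pvGB accB).map pvLift := by
  induction K generalizing accB with
  | nil => simp
  | cons k K ih =>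
    simp only [List.map_cons, List.foldl_cons]
    have hk := h k (by simp)
    have hstep : pvGA (accB.map pvLift) (k, f k) = (pvGB accB (k, g k)).map pvLift := by
      cases accB with
      | none => simp [pvGA, pvGB, pvLift, hk]
      | some b =>
        simp only [pvGA, pvGB, pvLift, Option.map_some, hk]
        by_cases hle : (g k).length ≤ b.2
        · rw [if_pos (by exact_mod_cast hle), if_pos hle]; rfl
        · rw [if_neg (by exact_mod_cast hle), if_neg hle]; rfl
    rw [hstep]
    exact ih (fun k' hk' => h k' (by simp [hk'])) (pvGB accB (k, g k))

theorem pv_foldB_shape (K : List Int) (g : Int → List (Int × Int)) (accB : Option (Int × Nat)) :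
    ((K.map (fun k => (k, g k))).foldl pvGB accB) = accB ∨
      ∃ k ∈ K, ∃ n : Nat, ((K.map (fun k => (k, g k))).foldl pvGB accB) = some (k, n) := by
  induction K generalizing accB with
  | nil => left; rfl
  | cons k K ih =>
    simp only [List.map_cons, List.foldl_cons]
    rcases ih (pvGB accB (k, g k)) with heq | ⟨k', hk', n, hn⟩
    · rw [heq]
      cases accB with
      | none => right; exact ⟨k, by simp, (g k).length, rfl⟩
      | some b =>
        simp only [pvGB]
        by_cases hle : (g k).length ≤ b.2
        · right; exact ⟨k, by simp, (g k).length, by rw [if_pos hle]⟩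
        · left; rw [if_neg hle]
    · right; exact ⟨k', by simp [hk'], n, hn⟩

theorem pv_pos_eq (grid : List (List Int)) :
    ((PySem.List.enumerate grid).foldl (fun d rp =>
        (PySem.List.enumerate rp.2).foldl (fun d cv =>
          if cv.2 != 0 then d.modify cv.2 [] (fun l => l ++ [(rp.1, cv.1)]) else d) d)
        PySem.Dict.empty) =
      (pvNz grid).foldl (fun d p => d.modify p.1 [] (fun l => l ++ [p.2])) PySem.Dict.empty := by
  rw [pvNz, pvCells, List.foldl_filter, List.foldl_flatMap]
  congr 1
  funext d rp
  rw [List.foldl_map]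

theorem pv_enum_filter_snd {α : Type} (p : α → Bool) (xs : List α) :
    ∀ s : Int, (((PySem.List.enumerate xs s).filter (fun cv => p cv.2)).map (fun cv => cv.2)) = xs.filter p := by
  induction xs with
  | nil => intro s; rfl
  | cons x xs ih =>
    intro s
    rw [PySem.List.enumerate_cons]
    by_cases hp : p x = true
    · simp only [List.filter_cons, hp]
      simp only [if_pos trivial, List.map_cons, ih (s+1)]
    · simp only [List.filter_cons, hp]
      rw [if_neg (by simp), if_neg (by simp), ih (s+1)]

theorem pv_flatMap_snd_enumerate {α β : Type} (xs : List α) (F : α → List β) :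
    ∀ s : Int, (PySem.List.enumerate xs s).flatMap (fun rp => F rp.2) = xs.flatMap F := by
  induction xs with
  | nil => intro s; rfl
  | cons x xs ih =>
    intro s
    rw [PySem.List.enumerate_cons, List.flatMap_cons, List.flatMap_cons, ih (s+1)]

theorem pv_colorsList_eq (grid : List (List Int)) :
    grid.flatMap (fun row => row.filter (fun c => c != 0)) = (pvNz grid).map (fun p => p.1) := by
  rw [pvNz, pvCells, List.filter_flatMap, List.map_flatMap,
    ← pv_flatMap_snd_enumerate (F := fun row => row.filter (fun c => c != 0)) grid 0]
  congr 1
  funext rp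
  rw [List.filter_map]
  have : ((fun p => p.1 != 0) ∘ (fun cv : Int × Int => (cv.2, (rp.1, cv.1)))) = (fun cv : Int × Int => cv.2 != 0) := rfl
  rw [this, List.map_map]
  have : ((fun p : Int × Int × Int => p.1) ∘ (fun cv : Int × Int => (cv.2, (rp.1, cv.1)))) = (fun cv : Int × Int => cv.2) := rfl
  rw [this]
  exact (pv_enum_filter_snd _ rp.2 0).symm

theorem pv_mem_cells_val (grid : List (List Int)) (p : Int × (Int × Int)) (h : p ∈ pvCells grid) :
    ∃ row ∈ grid, p.1 ∈ row := by
  rw [pvCells, List.mem_flatMap] at h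
  rcases h with ⟨rp, hrp, hp⟩
  rw [List.mem_map] at hp
  rcases hp with ⟨cv, hcv, rfl⟩
  rw [PySem.List.mem_enumerate_iff] at hrp
  rcases hrp with ⟨k, hk, rfl⟩
  refine ⟨grid[k], List.getElem_mem hk, ?_⟩
  rw [PySem.List.mem_enumerate_iff] at hcv
  rcases hcv with ⟨j, hj, rfl⟩
  simp only []
  exact List.getElem_mem hj

theorem pv_nz_filter (grid : List (List Int)) (v : Int) (hv : v ≠ 0) :
    (pvNz grid).filter (fun p => p.1 == v) = (pvCells grid).filter (fun p => p.1 == v) := by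
  rw [pvNz, List.filter_filter]
  congr 1
  funext p
  by_cases hp : p.1 = v
  · simp [hp, hv]
  · simp [hp]

theorem pv_scan_eq (grid : List (List Int)) (v : Int) (w : Nat)
    (hw : ∀ row ∈ grid, row.length = w) :
    (PySem.List.pyRange 0 (grid.length : Int)).flatMap (fun r =>
        ((PySem.List.pyRange 0 (w : Int)).filter (fun c =>
          ((PySem.List.pyGet? grid r).bind (fun row => PySem.List.pyGet? row c)) == some v)).map
          (fun c => (r, c)))
      = ((pvCells grid).filter (fun p => p.1 == v)).map (fun p => p.2) := by
  have h1 : PySem.List.pyRange 0 (grid.length : Int) =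
      (PySem.List.enumerate grid).map (fun rp => rp.1) := by
    rw [PySem.List.map_fst_enumerate]; norm_num
  rw [pvCells, List.filter_flatMap, List.map_flatMap, h1, List.flatMap_map]
  apply List.flatMap_congr
  intro rp hrp
  rw [PySem.List.mem_enumerate_iff] at hrp
  obtain ⟨k, hk, rfl⟩ := hrp
  simp only [zero_add]
  -- right side: push filter and outer map through the inner map
  rw [List.filter_map, List.map_map]
  have hc : ((fun p : Int × Int × Int => p.1 == v) ∘ (fun cv : Int × Int => (cv.2, ((k : Int), cv.1))))
      = (fun cv : Int × Int => cv.2 == v) := rfl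
  rw [hc]
  have hm : ((fun p : Int × Int × Int => p.2) ∘ (fun cv : Int × Int => (cv.2, ((k : Int), cv.1))))
      = (fun cv : Int × Int => ((k : Int), cv.1)) := rfl
  rw [hm]
  -- expand the inner enumerate as a pyRange map
  rw [PySem.List.enumerate_eq_map_pyRange grid[k] 0]
  have hlen : PySem.List.len grid[k] = (w : Int) := by
    have := hw grid[k] (List.getElem_mem hk)
    simp [PySem.List.len, this]
  rw [hlen, List.filter_map, List.map_map]
  have hc2 : ((fun cv : Int × Int => cv.2 == v) ∘ (fun j : Int => (j, PySem.List.pyGetD grid[k] j 0)))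
      = (fun j : Int => PySem.List.pyGetD grid[k] j 0 == v) := rfl
  rw [hc2]
  have hm2 : ((fun cv : Int × Int => ((k : Int), cv.1)) ∘ (fun j : Int => (j, PySem.List.pyGetD grid[k] j 0)))
      = (fun j : Int => ((k : Int), j)) := rfl
  rw [hm2]
  congr 1
  apply List.filter_congr
  intro j hj
  rw [PySem.List.mem_pyRange_one] at hj
  have hjw : j.toNat < grid[k].length := by
    have := hw grid[k] (List.getElem_mem hk); omega
  have hg1 : PySem.List.pyGet? grid ((k : Nat) : Int) = some grid[k] := by
    rw [PySem.List.pyGet?_natCast]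
    exact List.getElem?_eq_getElem hk
  have hg2 : PySem.List.pyGet? grid[k] j = some (grid[k][j.toNat]) := by
    have hj' : j = ((j.toNat : Nat) : Int) := by omega
    rw [show PySem.List.pyGet? grid[k] j = PySem.List.pyGet? grid[k] ((j.toNat : Nat) : Int) by rw [← hj'],
      PySem.List.pyGet?_natCast]
    exact List.getElem?_eq_getElem hjw
  have hg3 : PySem.List.pyGetD grid[k] j 0 = grid[k][j.toNat] :=
    PySem.List.pyGetD_eq_getElem _ _ (by omega) (by omega)
  rw [hg1, Option.bind_some, hg2, hg3]
  simp

theorem extract_unique_color_region_spec : Claim_equal_extract_unique_color_region := by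
  intro grid _ hpre
  unfold Spec_extract_unique_color_region
  by_cases hg : grid = [] ∨ grid.headD [] = []
  · rw [extract_unique_color_region, extract_unique_color_region_alt, if_pos hg, if_pos hg]
  · rw [extract_unique_color_region, extract_unique_color_region_alt, if_neg hg, if_neg hg]
    simp only [pv_pos_eq, pv_colorsList_eq]
    have hitems : (PySem.Dict.counter ((pvNz grid).map (fun p => p.1))).items =
        (PySem.Set.ofList ((pvNz grid).map (fun p => p.1))).map
          (fun k => (k, (List.count k ((pvNz grid).map (fun p => p.1)) : Int))) :=
      PySem.Dict.items_counter _
    have hkeys : ((pvNz grid).foldl (fun d p => d.modify p.1 [] (fun l => l ++ [p.2]))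
        PySem.Dict.empty).keys = PySem.Set.ofList ((pvNz grid).map (fun p => p.1)) := by
      have := PySem.Dict.keys_foldl_modify_key (pvNz grid) (fun p => p.1)
        ([] : List (Int × Int)) (fun _ p => fun l => l ++ [p.2]) PySem.Dict.empty
      simpa [PySem.Set.update_nil_left] using this
    have hnodup : ((pvNz grid).foldl (fun d p => d.modify p.1 [] (fun l => l ++ [p.2]))
        PySem.Dict.empty).keys.Nodup :=
      PySem.Dict.nodup_keys_foldl_modify_key _ _ _ _ _ PySem.Dict.nodup_keys_empty
    have hgetD : ∀ v : Int, ((pvNz grid).foldl (fun d p => d.modify p.1 [] (fun l => l ++ [p.2]))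
        PySem.Dict.empty).getD v [] = ((pvNz grid).filter (fun p => p.1 == v)).map (fun p => p.2) := by
      intro v
      rw [PySem.Dict.getD_foldl_modify_append]
      simp
    have hitemsB : ((pvNz grid).foldl (fun d p => d.modify p.1 [] (fun l => l ++ [p.2]))
        PySem.Dict.empty).items = (PySem.Set.ofList ((pvNz grid).map (fun p => p.1))).map
          (fun k => (k, ((pvNz grid).filter (fun p => p.1 == k)).map (fun p => p.2))) := by
      rw [PySem.Dict.items_eq_map_keys _ hnodup ([] : List (Int × Int)), hkeys]
      exact List.map_congr_left (fun k _ => by rw [hgetD k])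
    by_cases hKe : PySem.Set.ofList ((pvNz grid).map (fun p => p.1)) = []
    · rw [hitems, hitemsB, hKe]
      simp
    · rw [hitems, hitemsB]
      rw [if_neg (show ¬ (List.map (fun k => (k, (List.count k (List.map (fun p => p.1) (pvNz grid)) : Int)))
            (PySem.Set.ofList (List.map (fun p => p.1) (pvNz grid))) = []) by simp [hKe])]
      rw [if_neg (show ¬ (List.map (fun k => (k, List.map (fun p => p.2) (List.filter (fun p => p.1 == k) (pvNz grid))))
            (PySem.Set.ofList (List.map (fun p => p.1) (pvNz grid))) = []) by simp [hKe])]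
      -- B: the selection fold over the items
      rw [show (fun (acc : Option (Int × Nat)) (p : Int × List (Int × Int)) =>
            match acc with
            | none => some (p.1, p.2.length)
            | some b => if p.2.length ≤ b.2 then some (p.1, p.2.length) else some b) = pvGB from rfl]
      have hfg : ∀ k ∈ PySem.Set.ofList ((pvNz grid).map (fun p => p.1)),
          (List.count k (List.map (fun p => p.1) (pvNz grid)) : Int) =
            ((List.map (fun p => p.2) (List.filter (fun p => p.1 == k) (pvNz grid))).length : Int) := by
        intro k _
        rw [List.length_map, ← List.countP_eq_length_filter, List.count_eq_countP, List.countP_map]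
        rfl
      obtain ⟨k0, K', hK0⟩ := List.exists_cons_of_ne_nil hKe
      have hsel : ∃ b : Int × Nat,
          (List.foldl pvGB none ((PySem.Set.ofList ((pvNz grid).map (fun p => p.1))).map
            (fun k => (k, List.map (fun p => p.2) (List.filter (fun p => p.1 == k) (pvNz grid)))))) = some b ∧
          b.1 ∈ PySem.Set.ofList ((pvNz grid).map (fun p => p.1)) := by
        rw [hK0, List.map_cons, List.foldl_cons]
        rcases pv_foldB_shape K' (fun k => List.map (fun p => p.2) (List.filter (fun p => p.1 == k) (pvNz grid)))
            (pvGB none (k0, List.map (fun p => p.2) (List.filter (fun p => p.1 == k0) (pvNz grid)))) with heq | hex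
        · exact ⟨(k0, (List.map (fun p : Int × (Int × Int) => p.2)
              (List.filter (fun p : Int × (Int × Int) => p.1 == k0) (pvNz grid))).length),
            heq, List.mem_cons_self⟩
        · obtain ⟨k, hk, n, hn⟩ := hex
          exact ⟨(k, n), hn, List.mem_cons_of_mem k0 hk⟩
      obtain ⟨b, hbeq, hbK⟩ := hsel
      rw [hbeq]
      -- A: the last entry of the sorted items is the same selection
      have hlast : (PySem.List.sorted ((PySem.Set.ofList ((pvNz grid).map (fun p => p.1))).map
            (fun k => (k, (List.count k (List.map (fun p => p.1) (pvNz grid)) : Int))))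
            (fun kv => kv.2) true).getLast? = some (b.1, (b.2 : Int)) := by
        rw [pv_getLast?_sorted_rev]
        have hbr := pv_fold_bridge (PySem.Set.ofList ((pvNz grid).map (fun p => p.1)))
          (fun k => (List.count k (List.map (fun p => p.1) (pvNz grid)) : Int))
          (fun k => List.map (fun p => p.2) (List.filter (fun p => p.1 == k) (pvNz grid))) hfg none
        rw [Option.map_none] at hbr
        rw [hbr, hbeq]
        rfl
      rw [pv_pyGet?_neg_one, hlast]
      simp only [Option.getD_some]
      -- the winning color is a non-zero color of the grid
      rw [PySem.Set.mem_ofList] at hbK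
      obtain ⟨q, hqnz, hq1⟩ := List.mem_map.mp hbK
      have hqcell : q ∈ pvCells grid := List.mem_of_mem_filter hqnz
      have hq0 : (q.1 != 0) = true := (List.mem_filter.mp hqnz).2
      have hv0 : b.1 ≠ 0 := by rw [← hq1]; simpa using hq0
      -- Pre_ gives rectangularity here
      push Not at hg
      have hrect : ∀ row ∈ grid, row.length = (grid.headD []).length := by
        rcases hpre with h0 | hr | hz
        · exact absurd h0 hg.2
        · exact hr
        · obtain ⟨row, hrow, hqr⟩ := pv_mem_cells_val grid q hqcell
          exact absurd (hz row hrow q.1 hqr) (by simpa using hq0)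
      have hscan := pv_scan_eq grid b.1 (grid.headD []).length hrect
      have hrows : List.flatMap (fun r => List.map (fun _ => r)
            (List.filter (fun c => ((PySem.List.pyGet? grid r).bind fun row => PySem.List.pyGet? row c) == some b.1)
              (PySem.List.pyRange 0 ((grid.headD []).length : Int))))
            (PySem.List.pyRange 0 (grid.length : Int)) =
          (List.map (fun p => p.2) (List.filter (fun p => p.1 == b.1) (pvCells grid))).map (fun p => p.1) := by
        rw [← hscan, List.map_flatMap]
        exact List.flatMap_congr (fun r _ => by rw [List.map_map]; rfl)
      have hcols : List.flatMap (fun r =>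
            List.filter (fun c => ((PySem.List.pyGet? grid r).bind fun row => PySem.List.pyGet? row c) == some b.1)
              (PySem.List.pyRange 0 ((grid.headD []).length : Int)))
            (PySem.List.pyRange 0 (grid.length : Int)) =
          (List.map (fun p => p.2) (List.filter (fun p => p.1 == b.1) (pvCells grid))).map (fun p => p.2) := by
        rw [← hscan, List.map_flatMap]
        exact List.flatMap_congr (fun r _ => by rw [List.map_map]; exact (List.map_id _).symm)
      rw [hrows, hcols, hgetD b.1, pv_nz_filter grid b.1 hv0]
      have hQne : ¬ ((List.map (fun p => p.2) (List.filter (fun p => p.1 == b.1) (pvCells grid))).map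
          (fun p => p.1) = []) := by
        simp only [List.map_eq_nil_iff]
        exact List.ne_nil_of_mem (List.mem_filter.mpr ⟨hqcell, by rw [hq1] at *; simp⟩)
      rw [if_neg hQne]
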